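-- pv_equiv track=rewrite | github.com/ClaBirk/LMStudio-Chat | lmstudio_chat_v04.py | preprocess_markdown_headings
-- ===== SOURCE A (Python) =====
-- def preprocess_markdown_headings(text: str) -> str:
--     """
--     Preprocess markdown text to ensure all headings are at maximum h3 level.
--     Converts top-level (#) and second-level (##) headings to third-level (###).
--     """
--     lines = text.split('\n')
--     processed_lines = []
--
--     for line in lines:
--         # If line starts with # or ## but not ###, ####, etc.
--         if line.startswith('# '):
--             line = '### ' + line[2:]
--         elif line.startswith('## '):
--             line = '### ' + line[3:]
--         processed_lines.append(line)
--
--     return '\n'.join(processed_lines)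
-- ===== SOURCE B (Python) =====
-- def preprocess_markdown_headings(text: str) -> str:
--     """Single left-to-right scan: a line-start flag replaces split/join."""
--     out = []
--     i = 0
--     n = len(text)
--     at_start = True
--     while i < n:
--         if at_start and text.startswith('# ', i):
--             out.append('### ')
--             i += 2
--             at_start = False
--         elif at_start and text.startswith('## ', i):
--             out.append('### ')
--             i += 3
--             at_start = False
--         else:
--             c = text[i]
--             out.append(c)
--             at_start = (c == '\n')
--             i += 1
--     return ''.join(out)
-- ===== Notes on version B (the rewrite author's own statement) =====
-- stated objective: alternative
-- what changed: B replaces A's split-into-lines / per-line rewrite / join pipeline with a single left-to-right scan of the text that carries an at-line-start flag and rewrites one- and two-hash heading prefixes in place, never materialising the line list.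
import Mathlib
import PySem

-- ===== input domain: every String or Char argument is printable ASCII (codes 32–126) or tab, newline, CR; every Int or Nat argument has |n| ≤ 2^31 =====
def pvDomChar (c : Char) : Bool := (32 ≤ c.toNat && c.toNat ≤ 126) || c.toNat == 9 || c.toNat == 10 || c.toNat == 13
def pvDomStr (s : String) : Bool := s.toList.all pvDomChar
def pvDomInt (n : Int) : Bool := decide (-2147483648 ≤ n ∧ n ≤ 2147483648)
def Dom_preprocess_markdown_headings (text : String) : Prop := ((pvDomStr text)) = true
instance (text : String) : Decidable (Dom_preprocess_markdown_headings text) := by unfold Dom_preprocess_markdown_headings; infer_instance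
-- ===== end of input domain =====

-- B replaces A's split/loop/join with one left-to-right scan carrying a line-start flag (alternative decomposition, same result).


-- ===== PORT A =====
-- per-line body of A's for-loop
def pmhLineA (line : List Char) : List Char :=
  if PySem.Chars.startswith line ['#', ' '] then
    ['#', '#', '#', ' '] ++ PySem.Chars.slice line (some 2) none
  else if PySem.Chars.startswith line ['#', '#', ' '] then
    ['#', '#', '#', ' '] ++ PySem.Chars.slice line (some 3) none
  else line

def preprocess_markdown_headings (text : String) : String :=
  String.ofList (PySem.Chars.join ['\n']
    ((PySem.Chars.splitOn text.toList ['\n']).foldl (fun acc line => acc ++ [pmhLineA line]) []))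

-- ===== PORT B =====
-- Source B's while loop: scan once; at a line start test the '# ' / '## ' prefixes, else copy one char
def pmhGoB (atStart : Bool) (l : List Char) : List Char :=
  if h2 : atStart = true ∧ PySem.Chars.startswith l ['#', ' '] = true then
    ['#', '#', '#', ' '] ++ pmhGoB false (l.drop 2)
  else if h3 : atStart = true ∧ PySem.Chars.startswith l ['#', '#', ' '] = true then
    ['#', '#', '#', ' '] ++ pmhGoB false (l.drop 3)
  else
    match l with
    | [] => []
    | c :: rest => c :: pmhGoB (c == '\n') rest
termination_by l.length
decreasing_by
  · have h := ((PySem.Chars.startswith_iff l ['#', ' ']).mp h2.2).length_le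
    simp at h ⊢; omega
  · have h := ((PySem.Chars.startswith_iff l ['#', '#', ' ']).mp h3.2).length_le
    simp at h ⊢; omega
  · simp

def preprocess_markdown_headings_alt (text : String) : String :=
  String.ofList (pmhGoB true text.toList)

-- ===== PRECONDITION & SPEC =====
def Spec_preprocess_markdown_headings (text : String) (out : String) : Prop := out = preprocess_markdown_headings_alt text
instance (text : String) (out : String) : Decidable (Spec_preprocess_markdown_headings text out) := by unfold Spec_preprocess_markdown_headings; infer_instance

-- ===== CLAIM (what is proved, stated in full; the proofs are below) =====
def Claim_equal_preprocess_markdown_headings : Prop := ∀ (text : String), Dom_preprocess_markdown_headings text → Spec_preprocess_markdown_headings text (preprocess_markdown_headings text)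

-- ===== LEMMAS AND PROOFS =====

-- reference splitter: what PySem.Chars.splitOn computes for sep = ['\n']
def pmhSplit (pre : List Char) : List Char → List (List Char)
  | [] => [pre]
  | c :: rest => if c = '\n' then pre :: pmhSplit [] rest else pmhSplit (pre ++ [c]) rest

theorem pmhSplit_ne_nil (pre cs : List Char) : pmhSplit pre cs ≠ [] := by
  induction cs generalizing pre with
  | nil => simp [pmhSplit]
  | cons c rest ih => by_cases h : c = '\n' <;> simp [pmhSplit, h, ih]

theorem pmh_go_spec (fuel : Nat) : ∀ (l cur : List Char) (acc : List (List Char)),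
    l.length ≤ fuel →
    PySem.Chars.splitOn.go ['\n'] fuel l cur acc = acc.reverse ++ pmhSplit cur.reverse l := by
  induction fuel with
  | zero =>
    intro l cur acc h
    have hl : l = [] := by cases l <;> simp_all
    subst hl
    rw [PySem.Chars.splitOn.go]
    simp [pmhSplit]
  | succ n ih =>
    intro l cur acc h
    cases l with
    | nil => rw [PySem.Chars.splitOn.go]; simp [pmhSplit]; omega
    | cons c rest =>
      rw [PySem.Chars.splitOn.go]
      by_cases hc : c = '\n'
      · subst hc
        simp only [List.isPrefixOf]
        rw [if_pos (by simp)]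
        rw [ih _ _ _ (by simpa using h)]
        simp [pmhSplit]
      · rw [if_neg (by simp [List.isPrefixOf]; intro hcontra; exact hc hcontra.symm)]
        rw [ih _ _ _ (by simpa using h)]
        simp [pmhSplit, hc]

theorem pmh_splitOn_eq (cs : List Char) :
    PySem.Chars.splitOn cs ['\n'] = pmhSplit [] cs := by
  have := pmh_go_spec (cs.length + 1) cs [] [] (by omega)
  simpa [PySem.Chars.splitOn] using this

-- pmhSplit on a line with no newline
theorem pmhSplit_no_nl (pre cs : List Char) (h : '\n' ∉ cs) : pmhSplit pre cs = [pre ++ cs] := by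
  induction cs generalizing pre with
  | nil => simp [pmhSplit]
  | cons c rest ih =>
    simp at h
    have hc : ¬ c = '\n' := fun e => h.1 e.symm
    simp [pmhSplit, hc, ih _ h.2]

theorem pmhSplit_append_nl (pre l rest : List Char) (h : '\n' ∉ l) :
    pmhSplit pre (l ++ '\n' :: rest) = (pre ++ l) :: pmhSplit [] rest := by
  induction l generalizing pre with
  | nil => simp [pmhSplit]
  | cons c t ih =>
    simp at h
    have hc : ¬ c = '\n' := fun e => h.1 e.symm
    simp [pmhSplit, hc, ih _ h.2]

-- the '# ' / '## ' tests see only the current line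
theorem pmh_sw2 (l rest : List Char) :
    PySem.Chars.startswith (l ++ '\n' :: rest) ['#', ' '] = PySem.Chars.startswith l ['#', ' '] := by
  rcases l with _ | ⟨c1, _ | ⟨c2, t⟩⟩ <;> simp [PySem.Chars.startswith, List.isPrefixOf]

theorem pmh_sw3 (l rest : List Char) :
    PySem.Chars.startswith (l ++ '\n' :: rest) ['#', '#', ' '] = PySem.Chars.startswith l ['#', '#', ' '] := by
  rcases l with _ | ⟨c1, _ | ⟨c2, _ | ⟨c3, t⟩⟩⟩ <;> simp [PySem.Chars.startswith, List.isPrefixOf]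

-- pmhGoB in copy mode (not at a line start)
theorem pmhGoB_false_no_nl (ls : List Char) (h : '\n' ∉ ls) : pmhGoB false ls = ls := by
  induction ls with
  | nil => rw [pmhGoB]; simp
  | cons c t ih =>
    simp at h
    have hc : (c == '\n') = false := by simp; exact fun e => h.1 e.symm
    rw [pmhGoB]
    simp [hc, ih h.2]

theorem pmhGoB_false_append (ls rest : List Char) (h : '\n' ∉ ls) :
    pmhGoB false (ls ++ '\n' :: rest) = ls ++ '\n' :: pmhGoB true rest := by
  induction ls with
  | nil => rw [pmhGoB]; simp
  | cons c t ih =>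
    simp at h
    have hc : (c == '\n') = false := by simp; exact fun e => h.1 e.symm
    rw [pmhGoB]
    simp [hc, ih h.2]

-- pmhGoB at a line start, on one full line
theorem pmhGoB_true_no_nl (l : List Char) (h : '\n' ∉ l) : pmhGoB true l = pmhLineA l := by
  by_cases h2 : PySem.Chars.startswith l ['#', ' '] = true
  · obtain ⟨t, ht⟩ := (PySem.Chars.startswith_iff l ['#', ' ']).mp h2
    subst ht
    rw [pmhGoB, dif_pos ⟨rfl, h2⟩]
    simp at h
    rw [pmhLineA, if_pos h2, PySem.Chars.slice_eq_listSlice,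
      PySem.List.slice_from _ (by norm_num)]
    simp [pmhGoB_false_no_nl t h]
  · by_cases h3 : PySem.Chars.startswith l ['#', '#', ' '] = true
    · obtain ⟨t, ht⟩ := (PySem.Chars.startswith_iff l ['#', '#', ' ']).mp h3
      subst ht
      rw [pmhGoB, dif_neg (by simp [PySem.Chars.startswith, List.isPrefixOf]), dif_pos ⟨rfl, h3⟩]
      simp at h
      rw [pmhLineA, if_neg (by simpa using h2), if_pos h3, PySem.Chars.slice_eq_listSlice,
        PySem.List.slice_from _ (by norm_num)]
      simp [pmhGoB_false_no_nl t h]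
    · rw [pmhGoB, dif_neg (by simp [h2]), dif_neg (by simp [h3]),
        pmhLineA, if_neg h2, if_neg h3]
      cases l with
      | nil => rfl
      | cons c t =>
        simp at h
        have hc : (c == '\n') = false := by simp; exact fun e => h.1 e.symm
        show c :: pmhGoB (c == '\n') t = c :: t
        rw [hc, pmhGoB_false_no_nl t h.2]

theorem pmhGoB_true_append (l rest : List Char) (h : '\n' ∉ l) :
    pmhGoB true (l ++ '\n' :: rest) = pmhLineA l ++ '\n' :: pmhGoB true rest := by
  by_cases h2 : PySem.Chars.startswith l ['#', ' '] = true
  · obtain ⟨t, ht⟩ := (PySem.Chars.startswith_iff l ['#', ' ']).mp h2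
    subst ht
    rw [pmhGoB, dif_pos ⟨rfl, by simp [PySem.Chars.startswith, List.isPrefixOf]⟩]
    simp at h
    rw [pmhLineA, if_pos h2, PySem.Chars.slice_eq_listSlice,
      PySem.List.slice_from _ (by norm_num)]
    simp [pmhGoB_false_append t rest h]
  · by_cases h3 : PySem.Chars.startswith l ['#', '#', ' '] = true
    · obtain ⟨t, ht⟩ := (PySem.Chars.startswith_iff l ['#', '#', ' ']).mp h3
      subst ht
      rw [pmhGoB, dif_neg (by simp [PySem.Chars.startswith, List.isPrefixOf]),
        dif_pos ⟨rfl, by simp [PySem.Chars.startswith, List.isPrefixOf]⟩]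
      simp at h
      rw [pmhLineA, if_neg (by simpa using h2), if_pos h3, PySem.Chars.slice_eq_listSlice,
        PySem.List.slice_from _ (by norm_num)]
      simp [pmhGoB_false_append t rest h]
    · rw [pmhGoB, dif_neg (by rw [pmh_sw2]; simp [h2]), dif_neg (by rw [pmh_sw3]; simp [h3]),
        pmhLineA, if_neg h2, if_neg h3]
      cases l with
      | nil => simp
      | cons c t =>
        simp at h
        have hc : (c == '\n') = false := by simp; exact fun e => h.1 e.symm
        show c :: pmhGoB (c == '\n') (t ++ '\n' :: rest) = (c :: t) ++ '\n' :: pmhGoB true rest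
        rw [hc, pmhGoB_false_append t rest h.2]
        simp

-- the head of dropWhile fails the predicate
theorem pmh_dropWhile_head {p : Char → Bool} : ∀ (cs : List Char) (c : Char) (rest : List Char),
    cs.dropWhile p = c :: rest → p c = false := by
  intro cs
  induction cs with
  | nil => intro c rest h; simp [List.dropWhile] at h
  | cons a t ih =>
    intro c rest h
    rw [List.dropWhile_cons] at h
    by_cases ha : p a = true
    · rw [if_pos ha] at h; exact ih c rest h
    · rw [if_neg ha] at h
      obtain ⟨h1, _⟩ := List.cons.injEq .. ▸ h
      cases h; simpa using ha

-- main: the single scan equals per-line map + join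
theorem pmh_main_n : ∀ (n : Nat) (cs : List Char), cs.length ≤ n →
    pmhGoB true cs = PySem.Chars.join ['\n'] ((pmhSplit [] cs).map pmhLineA) := by
  intro n
  induction n with
  | zero =>
    intro cs h
    have : cs = [] := by cases cs <;> simp_all
    subst this
    rw [pmhGoB]
    simp [pmhSplit, PySem.Chars.join_singleton, pmhLineA, PySem.Chars.startswith, List.isPrefixOf]
  | succ n ih =>
    intro cs h
    have hsplit : cs = cs.takeWhile (fun c => c != '\n') ++ cs.dropWhile (fun c => c != '\n') :=
      (List.takeWhile_append_dropWhile).symm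
    have hl : '\n' ∉ cs.takeWhile (fun c => c != '\n') := by
      intro hm
      have := List.mem_takeWhile_imp hm
      simp at this
    cases hd : cs.dropWhile (fun c => c != '\n') with
    | nil =>
      rw [hd] at hsplit
      simp at hsplit
      have hl' : '\n' ∉ cs := by rw [hsplit]; exact hl
      rw [pmhGoB_true_no_nl _ hl', pmhSplit_no_nl _ _ hl']
      simp [PySem.Chars.join_singleton]
    | cons c rest =>
      have hc : c = '\n' := by
        have := pmh_dropWhile_head cs c rest hd
        simpa using this
      subst hc
      rw [hd] at hsplit
      have hlen : rest.length ≤ n := by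
        have := congrArg List.length hsplit
        simp at this
        omega
      rw [hsplit, pmhGoB_true_append _ _ hl, pmhSplit_append_nl _ _ _ hl]
      simp only [List.nil_append, List.map_cons]
      obtain ⟨p, ps, hps⟩ : ∃ p ps, (pmhSplit [] rest).map pmhLineA = p :: ps := by
        cases hq : pmhSplit [] rest with
        | nil => exact absurd hq (pmhSplit_ne_nil [] rest)
        | cons q qs => exact ⟨pmhLineA q, qs.map pmhLineA, by simp⟩
      rw [hps, PySem.Chars.join_cons_cons, ih rest hlen, hps]
      simp

theorem pmh_main (cs : List Char) :
    pmhGoB true cs = PySem.Chars.join ['\n'] ((pmhSplit [] cs).map pmhLineA) :=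
  pmh_main_n cs.length cs le_rfl

-- ===== VERDICT (by name: the statement is the Claim_ definition above) =====
theorem preprocess_markdown_headings_spec : Claim_equal_preprocess_markdown_headings := by
  intro text _
  unfold Spec_preprocess_markdown_headings preprocess_markdown_headings preprocess_markdown_headings_alt
  rw [PySem.List.foldl_append_singleton_eq_map, pmh_splitOn_eq, pmh_main]
  simp
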